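-- pv_equiv track=rewrite | github.com/alonana/top | python/2020/over_9000_rocks.py | count_possibilities
-- ===== SOURCE A (Python) =====
-- class Range:
--     def __init__(self, lower, upper):
--         self.lower = lower
--         self.upper = upper
--
--     def __repr__(self):
--         return "{}-{}".format(self.lower, self.upper)
--
--     def add(self, other):
--         self.lower += other.lower
--         self.upper += other.upper
--
-- def count_possibilities(lower_bound, upper_bound):
--     ranges = []
--     n = len(lower_bound)
--     limit = 1 << n
--     for boxes_bits in range(limit):
--         r = Range(0, 0)
--         for box in range(n):
--             if (1 << box) & boxes_bits:
--                 r.add(Range(lower_bound[box], upper_bound[box]))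
--         ranges.append(r)
--
--     ranges = sorted(ranges, key=lambda x: x.lower)
--
--     highest = 0
--     total = 0
--     for r in ranges:
--         current_low = max([r.lower, 9001, highest])
--         if current_low <= r.upper:
--             total += r.upper - current_low + 1
--         highest = max(r.upper + 1, highest)
--     return total
-- ===== SOURCE B (Python) =====
-- def count_possibilities(lower_bound, upper_bound):
--     # Build the 2^n subset-sum intervals by incremental doubling.
--     subs = [(0, 0)]
--     for lb, ub in zip(lower_bound, upper_bound):
--         subs = subs + [(l + lb, u + ub) for (l, u) in subs]
--     # Sort by lower bound and merge into disjoint intervals.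
--     subs.sort(key=lambda p: p[0])
--     merged = []
--     cur_lo, cur_hi = subs[0]
--     for lo, hi in subs[1:]:
--         if lo <= cur_hi + 1:
--             cur_hi = max(cur_hi, hi)
--         else:
--             merged.append((cur_lo, cur_hi))
--             cur_lo, cur_hi = lo, hi
--     merged.append((cur_lo, cur_hi))
--     # Count the integers >= 9001 covered by the disjoint intervals.
--     return sum(max(0, hi - max(lo, 9001) + 1) for lo, hi in merged)
-- ===== Notes on version B (the rewrite author's own statement) =====
-- stated objective: alternative
-- what changed: B builds the 2^n subset intervals by incremental doubling (subs = subs + shifted copy per box) instead of A's per-bitmask inner bit-test loop, and replaces A's fused watermark sweep by a separate sort-merge-into-disjoint-intervals pass followed by a counting pass.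
import Mathlib
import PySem

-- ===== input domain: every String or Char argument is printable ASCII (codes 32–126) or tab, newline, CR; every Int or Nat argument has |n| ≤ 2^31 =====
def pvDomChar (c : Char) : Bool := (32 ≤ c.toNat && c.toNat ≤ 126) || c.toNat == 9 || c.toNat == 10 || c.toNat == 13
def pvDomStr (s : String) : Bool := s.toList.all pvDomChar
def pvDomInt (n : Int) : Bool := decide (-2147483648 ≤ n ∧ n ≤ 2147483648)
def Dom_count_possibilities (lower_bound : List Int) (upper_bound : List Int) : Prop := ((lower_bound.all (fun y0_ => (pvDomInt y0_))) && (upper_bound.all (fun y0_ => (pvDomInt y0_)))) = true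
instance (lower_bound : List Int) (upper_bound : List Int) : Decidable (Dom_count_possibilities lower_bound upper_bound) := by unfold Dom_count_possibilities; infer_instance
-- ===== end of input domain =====

-- B replaces A's bitmask enumeration of subset intervals by an incremental doubling recurrence
-- and splits A's fused watermark sweep into a separate interval-merge pass plus a counting pass
-- (objective: alternative decomposition, similar cost).

-- ===== PORT A =====
-- inner loop 'for box in range(n): if (1 << box) & boxes_bits: r.add(...)' ; Range objects are (lower, upper) pairs.
-- 'box.toNat' is exact: box comes from range(n) so 0 ≤ box, and Python's 1 << box is Lean's (1 : Int) <<< (box.toNat).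
def pvA_mkRange (lower_bound upper_bound : List Int) (n : Int) (boxes_bits : Int) : Int × Int :=
  (PySem.List.pyRange 0 n 1).foldl
    (fun r box =>
      if PySem.Int.band ((1 : Int) <<< box.toNat) boxes_bits ≠ 0 then
        (r.1 + PySem.List.pyGetD lower_bound box 0, r.2 + PySem.List.pyGetD upper_bound box 0)
      else r)
    (0, 0)

-- one step of A's sweep: state (highest, total); max([r.lower, 9001, highest]) is the nested max.
def pvA_sweep (st : Int × Int) (r : Int × Int) : Int × Int :=
  let current_low := max (max r.1 9001) st.1
  (max (r.2 + 1) st.1, if current_low ≤ r.2 then st.2 + (r.2 - current_low + 1) else st.2)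

def count_possibilities (lower_bound : List Int) (upper_bound : List Int) : Int :=
  let n : Int := PySem.List.len lower_bound
  let limit : Int := (1 : Int) <<< n.toNat   -- 1 << n ; n = len(lower_bound) ≥ 0
  let ranges : List (Int × Int) :=
    (PySem.List.pyRange 0 limit 1).foldl
      (fun acc boxes_bits => acc ++ [pvA_mkRange lower_bound upper_bound n boxes_bits]) []
  let ranges := PySem.List.sorted ranges (fun x => x.1) false
  (ranges.foldl pvA_sweep (0, 0)).2

-- ===== PORT B =====
-- subs = subs + [(l + lb, u + ub) for (l, u) in subs]
def pvB_double (subs : List (Int × Int)) (p : Int × Int) : List (Int × Int) :=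
  subs ++ subs.map (fun q => (q.1 + p.1, q.2 + p.2))

-- merge loop body: state (merged, cur_lo, cur_hi)
def pvB_mergeStep (st : List (Int × Int) × Int × Int) (p : Int × Int) : List (Int × Int) × Int × Int :=
  if p.1 ≤ st.2.2 + 1 then (st.1, st.2.1, max st.2.2 p.2)
  else (st.1 ++ [(st.2.1, st.2.2)], p.1, p.2)

def pvB_cnt (p : Int × Int) : Int := max 0 (p.2 - max p.1 9001 + 1)

-- final 'merged.append((cur_lo, cur_hi)); return sum(max(0, hi - max(lo, 9001) + 1) ...)'
def pvB_count (st : List (Int × Int) × Int × Int) : Int :=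
  ((st.1 ++ [(st.2.1, st.2.2)]).map pvB_cnt).sum

def count_possibilities_alt (lower_bound : List Int) (upper_bound : List Int) : Int :=
  let subs : List (Int × Int) := (lower_bound.zip upper_bound).foldl pvB_double [(0, 0)]
  let subs := PySem.List.sorted subs (fun p => p.1) false
  match subs with
  | [] => 0   -- unreachable: subs always contains the empty-subset interval (0, 0)
  | first :: rest => pvB_count (rest.foldl pvB_mergeStep ([], first.1, first.2))

-- ===== PRECONDITION & SPEC =====
-- Pre_ excludes only inputs where upper_bound is shorter than lower_bound, on which A raises IndexError.
def Pre_count_possibilities (lower_bound : List Int) (upper_bound : List Int) : Prop :=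
  lower_bound.length ≤ upper_bound.length
instance (lower_bound : List Int) (upper_bound : List Int) : Decidable (Pre_count_possibilities lower_bound upper_bound) := by unfold Pre_count_possibilities; infer_instance

def pvWitness_count_possibilities : List Int × List Int := ([1, -3], [4, 5])

def Spec_count_possibilities (lower_bound : List Int) (upper_bound : List Int) (out : Int) : Prop := out = count_possibilities_alt lower_bound upper_bound
instance (lower_bound : List Int) (upper_bound : List Int) (out : Int) : Decidable (Spec_count_possibilities lower_bound upper_bound out) := by unfold Spec_count_possibilities; infer_instance

-- ===== CLAIM (what is proved, stated in full; the proofs are below) =====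
def Claim_equal_count_possibilities : Prop := ∀ (lower_bound : List Int) (upper_bound : List Int), Dom_count_possibilities lower_bound upper_bound → Pre_count_possibilities lower_bound upper_bound → Spec_count_possibilities lower_bound upper_bound (count_possibilities lower_bound upper_bound)

-- ===== LEMMAS AND PROOFS =====

-- Reference enumeration of the 2^n subset intervals, in bitmask order (bit 0 = first pair),
-- with an explicit accumulator so that it matches both ports' folds.
def pvMsum : List (Int × Int) → Nat → Int × Int → Int × Int
  | [], _, acc => acc
  | p :: ps, m, acc => pvMsum ps (m / 2) (if m % 2 = 1 then (acc.1 + p.1, acc.2 + p.2) else acc)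

def pvEnum (pairs : List (Int × Int)) : List (Int × Int) :=
  (List.range (2 ^ pairs.length)).map (fun m => pvMsum pairs m (0, 0))

lemma pvRange_nat (n : Nat) :
    PySem.List.pyRange 0 (n : Int) 1 = (List.range n).map (fun (k : Nat) => (k : Int)) := by
  simp [PySem.List.pyRange_zero_nat]

lemma pvMsum_append_lt : ∀ (pairs : List (Int × Int)) (z : Int × Int) (m : Nat) (acc : Int × Int),
    m < 2 ^ pairs.length → pvMsum (pairs ++ [z]) m acc = pvMsum pairs m acc := by
  intro pairs
  induction pairs with
  | nil =>
    intro z m acc hm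
    have h0 : m = 0 := by simp at hm; omega
    subst h0
    simp [pvMsum]
  | cons p ps ih =>
    intro z m acc hm
    have hp : 2 ^ (ps.length + 1) = 2 * 2 ^ ps.length := by ring
    simp only [List.cons_append, pvMsum]
    exact ih z (m / 2) _ (by simp only [List.length_cons] at hm; omega)

lemma pvMsum_append_high : ∀ (pairs : List (Int × Int)) (z : Int × Int) (m : Nat) (acc : Int × Int),
    m < 2 ^ pairs.length →
    pvMsum (pairs ++ [z]) (2 ^ pairs.length + m) acc
      = ((pvMsum pairs m acc).1 + z.1, (pvMsum pairs m acc).2 + z.2) := by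
  intro pairs
  induction pairs with
  | nil =>
    intro z m acc hm
    have h0 : m = 0 := by simp at hm; omega
    subst h0
    simp [pvMsum]
  | cons p ps ih =>
    intro z m acc hm
    have hp : 2 ^ (ps.length + 1) = 2 * 2 ^ ps.length := by ring
    simp only [List.length_cons] at hm ⊢
    have h2 : (2 ^ (ps.length + 1) + m) / 2 = 2 ^ ps.length + m / 2 := by omega
    have h3 : (2 ^ (ps.length + 1) + m) % 2 = m % 2 := by omega
    simp only [List.cons_append, pvMsum, h2, h3]
    exact ih z (m / 2) _ (by omega)

lemma pvB_subs_eq_pvEnum : ∀ (pairs : List (Int × Int)),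
    pairs.foldl pvB_double [(0, 0)] = pvEnum pairs := by
  intro pairs
  induction pairs using List.reverseRecOn with
  | nil => simp [pvEnum, pvMsum]
  | append_singleton ps z ih =>
    rw [List.foldl_append, List.foldl_cons, List.foldl_nil, ih]
    unfold pvB_double pvEnum
    have hlen : (ps ++ [z]).length = ps.length + 1 := by simp
    rw [hlen]
    have hpow : 2 ^ (ps.length + 1) = 2 ^ ps.length + 2 ^ ps.length := by ring
    rw [hpow, List.range_add, List.map_append, List.map_map]
    congr 1
    · apply List.map_congr_left
      intro m hm
      exact (pvMsum_append_lt ps z m (0, 0) (List.mem_range.mp hm)).symm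
    · rw [List.map_map]
      apply List.map_congr_left
      intro m hm
      simp only [Function.comp_apply]
      exact (pvMsum_append_high ps z m (0, 0) (List.mem_range.mp hm)).symm

lemma pvA_fold_eq_msum : ∀ (lb ub : List Int), lb.length ≤ ub.length → ∀ (m : Nat) (acc : Int × Int),
    (List.range lb.length).foldl
      (fun r k => if m.testBit k then (r.1 + lb.getD k 0, r.2 + ub.getD k 0) else r) acc
      = pvMsum (lb.zip ub) m acc := by
  intro lb
  induction lb with
  | nil => intro ub _ m acc; simp [pvMsum]
  | cons a lb' ih =>
    intro ub hlen m acc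
    cases ub with
    | nil => simp at hlen
    | cons b ub' =>
      simp only [List.length_cons, List.range_succ_eq_map, List.foldl_cons, List.foldl_map]
      simp only [List.getD_cons_zero, List.getD_cons_succ, Nat.testBit_add_one, Nat.testBit_zero]
      rw [ih ub' (by simpa using hlen) (m / 2) _]
      simp only [List.zip_cons_cons, pvMsum]
      congr 1
      by_cases h : m % 2 = 1 <;> simp [h]

lemma pvA_mkRange_eq (lb ub : List Int) (hlen : lb.length ≤ ub.length) (m : Nat) :
    pvA_mkRange lb ub (PySem.List.len lb) (m : Int) = pvMsum (lb.zip ub) m (0, 0) := by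
  unfold pvA_mkRange
  rw [PySem.List.len_eq]
  rw [pvRange_nat lb.length, List.foldl_map]
  rw [← pvA_fold_eq_msum lb ub hlen m (0, 0)]
  apply List.foldl_ext
  intro r k _
  simp only [Int.toNat_natCast, PySem.List.pyGetD_natCast]
  have hshift : (1 : Int) <<< ((k : Nat) : Int) = ((2 ^ k : Nat) : Int) := by
    simpa [Nat.shiftLeft_eq] using Int.shiftLeft_natCast 1 k
  have hband : (PySem.Int.band ((2 ^ k : Nat) : Int) (m : Int) ≠ 0) ↔ m.testBit k := by
    rw [PySem.Int.band_natCast, Nat.two_pow_and]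
    rcases h : m.testBit k <;> simp
  rw [hshift]
  by_cases hb : m.testBit k
  · rw [if_pos (hband.mpr hb), if_pos hb]
  · rw [if_neg (fun hc => hb (hband.mp hc)), if_neg hb]

lemma pvEnum_ne_nil (pairs : List (Int × Int)) : pvEnum pairs ≠ [] := by
  simp [pvEnum, List.range_eq_nil]

-- The watermark sweep over the remaining (sorted) intervals computes the same total as
-- merging them into disjoint intervals and counting afterwards.
lemma pv_sweep_merge : ∀ (rest : List (Int × Int)) (M : List (Int × Int)) (curLo curHi H T : Int),
    (∀ p ∈ rest, curLo ≤ p.1) → rest.Pairwise (fun a b => a.1 ≤ b.1) →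
    curHi + 1 ≤ H → H ≤ max (max curLo 0) (curHi + 1) →
    (rest.foldl pvA_sweep (H, T)).2
      = T - pvB_cnt (curLo, curHi) - (M.map pvB_cnt).sum
        + pvB_count (rest.foldl pvB_mergeStep (M, curLo, curHi)) := by
  intro rest
  induction rest with
  | nil =>
    intro M curLo curHi H T _ _ _ _
    simp [pvB_count]
    ring
  | cons p rest ih =>
    intro M curLo curHi H T hlo hpw hH1 hH2
    have hplo : curLo ≤ p.1 := hlo p (by simp)
    have hrest : ∀ q ∈ rest, p.1 ≤ q.1 := fun q hq => (List.pairwise_cons.mp hpw).1 q hq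
    have hpw' : rest.Pairwise (fun a b => a.1 ≤ b.1) := (List.pairwise_cons.mp hpw).2
    simp only [List.foldl_cons]
    by_cases hc : p.1 ≤ curHi + 1
    · -- extend the current interval
      rw [show pvB_mergeStep (M, curLo, curHi) p = (M, curLo, max curHi p.2) by
        simp [pvB_mergeStep, hc]]
      rw [show pvA_sweep (H, T) p
          = (max (p.2 + 1) H,
             if max (max p.1 9001) H ≤ p.2 then T + (p.2 - max (max p.1 9001) H + 1) else T) from rfl]
      rw [ih M curLo (max curHi p.2) _ _ (fun q hq => le_trans hplo (hrest q hq)) hpw'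
            (by omega) (by omega)]
      have : (if max (max p.1 9001) H ≤ p.2 then T + (p.2 - max (max p.1 9001) H + 1) else T)
          - pvB_cnt (curLo, max curHi p.2) = T - pvB_cnt (curLo, curHi) := by
        simp only [pvB_cnt]
        split_ifs <;> omega
      omega
    · -- close the current interval and start a new one
      rw [show pvB_mergeStep (M, curLo, curHi) p = (M ++ [(curLo, curHi)], p.1, p.2) by
        simp [pvB_mergeStep, hc]]
      rw [show pvA_sweep (H, T) p
          = (max (p.2 + 1) H,
             if max (max p.1 9001) H ≤ p.2 then T + (p.2 - max (max p.1 9001) H + 1) else T) from rfl]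
      rw [ih (M ++ [(curLo, curHi)]) p.1 p.2 _ _ hrest hpw' (by omega) (by omega)]
      have hsum : ((M ++ [(curLo, curHi)]).map pvB_cnt).sum
          = (M.map pvB_cnt).sum + pvB_cnt (curLo, curHi) := by
        simp
      have : (if max (max p.1 9001) H ≤ p.2 then T + (p.2 - max (max p.1 9001) H + 1) else T)
          - pvB_cnt (p.1, p.2) = T := by
        simp only [pvB_cnt]
        split_ifs <;> omega
      omega

lemma pv_sweep_eq_merge_cons (first : Int × Int) (rest : List (Int × Int))
    (hpw : (first :: rest).Pairwise (fun a b => a.1 ≤ b.1)) :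
    ((first :: rest).foldl pvA_sweep (0, 0)).2
      = pvB_count (rest.foldl pvB_mergeStep ([], first.1, first.2)) := by
  have hrest : ∀ q ∈ rest, first.1 ≤ q.1 := fun q hq => (List.pairwise_cons.mp hpw).1 q hq
  have hpw' : rest.Pairwise (fun a b => a.1 ≤ b.1) := (List.pairwise_cons.mp hpw).2
  rw [List.foldl_cons]
  have hT1 : pvA_sweep (0, 0) first = (max (first.2 + 1) 0, pvB_cnt first) := by
    simp only [pvA_sweep, pvB_cnt]
    refine Prod.ext rfl ?_
    dsimp only
    split_ifs <;> omega
  rw [hT1]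
  rw [pv_sweep_merge rest [] first.1 first.2 _ _ hrest hpw' (by omega) (by omega)]
  simp

-- ===== VERDICT (by name: the statement is the Claim_ definition above) =====
theorem count_possibilities_spec : Claim_equal_count_possibilities := by
  intro lb ub _ hpre
  unfold Pre_count_possibilities at hpre
  unfold Spec_count_possibilities count_possibilities count_possibilities_alt
  dsimp only
  have hn : (PySem.List.len lb).toNat = lb.length := by rw [PySem.List.len_eq]; rfl
  have hlimit : (1 : Int) <<< (PySem.List.len lb).toNat = ((2 ^ lb.length : Nat) : Int) := by
    rw [hn]
    have h : (1 : Int) <<< lb.length = Int.ofNat (1 <<< lb.length) := rfl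
    rw [h]; simp [Nat.shiftLeft_eq]
  have hzlen : (lb.zip ub).length = lb.length := by
    rw [List.length_zip]; omega
  have hranges :
      (PySem.List.pyRange 0 ((1 : Int) <<< (PySem.List.len lb).toNat) 1).foldl
        (fun acc boxes_bits => acc ++ [pvA_mkRange lb ub (PySem.List.len lb) boxes_bits]) []
        = pvEnum (lb.zip ub) := by
    rw [hlimit]
    rw [pvRange_nat (2 ^ lb.length)]
    rw [PySem.List.foldl_append_singleton_eq_map, List.map_map]
    unfold pvEnum
    rw [hzlen]
    simp only [List.nil_append]
    apply List.map_congr_left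
    intro m _
    exact pvA_mkRange_eq lb ub hpre m
  rw [hranges, pvB_subs_eq_pvEnum (lb.zip ub)]
  have hne : PySem.List.sorted (pvEnum (lb.zip ub)) (fun p => p.1) false ≠ [] := by
    rw [Ne, PySem.List.sorted_eq_nil_iff]
    exact pvEnum_ne_nil _
  obtain ⟨first, rest, hS⟩ := List.exists_cons_of_ne_nil hne
  rw [hS]
  have hpw : (first :: rest).Pairwise (fun a b => a.1 ≤ b.1) := by
    rw [← hS]
    exact PySem.List.sorted_pairwise (pvEnum (lb.zip ub)) (fun p => p.1)
  exact pv_sweep_eq_merge_cons first rest hpw
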